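-- pv_equiv track=rewrite | github.com/libinruan/delightcode | lintcode/j1323_fetch_supplies.py | Fetchsupplies
-- ===== SOURCE A (Python) =====
-- def Fetchsupplies(coordinates):
--     # write your code here
--     coordinates.sort(key = lambda x:x[0])
--     length = len(coordinates)
--     index = 0
--     gap = 1
--     distance = 0
--     if length % 2 == 0:
--         index = length // 2
--     else:
--         index = (length+1) // 2
--         gap = 2
--     for i in range(index,length):
--         distance += (coordinates[i][0]-coordinates[i-gap][0])
--         gap += 2
--     return distance
-- ===== SOURCE B (Python) =====
-- def Fetchsupplies(coordinates):
--     # Different algorithm: quickselect the median x-coordinate (no full sort),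
--     # then the answer is the sum of absolute deviations from that median.
--     xs = [c[0] for c in coordinates]
--     n = len(xs)
--     if n == 0:
--         return 0
--     k = n // 2
--     cur = xs
--     while True:
--         p = cur[len(cur) // 2]
--         lt = [x for x in cur if x < p]
--         if k < len(lt):
--             cur = lt
--             continue
--         eq = len([x for x in cur if x == p])
--         if k < len(lt) + eq:
--             m = p
--             break
--         k -= len(lt) + eq
--         cur = [x for x in cur if x > p]
--     return sum(abs(x - m) for x in xs)
-- ===== Notes on version B (the rewrite author's own statement) =====
-- stated objective: alternative
-- what changed: A sorts all points and sums gaps between mirrored halves; B never sorts: it quickselects the median x-coordinate (partition loop, O(n) average) and returns the sum of absolute deviations from it.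
-- outside the precondition, e.g. on Fetchsupplies([[1], []]): A raises IndexError, B raises IndexError
import Mathlib
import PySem

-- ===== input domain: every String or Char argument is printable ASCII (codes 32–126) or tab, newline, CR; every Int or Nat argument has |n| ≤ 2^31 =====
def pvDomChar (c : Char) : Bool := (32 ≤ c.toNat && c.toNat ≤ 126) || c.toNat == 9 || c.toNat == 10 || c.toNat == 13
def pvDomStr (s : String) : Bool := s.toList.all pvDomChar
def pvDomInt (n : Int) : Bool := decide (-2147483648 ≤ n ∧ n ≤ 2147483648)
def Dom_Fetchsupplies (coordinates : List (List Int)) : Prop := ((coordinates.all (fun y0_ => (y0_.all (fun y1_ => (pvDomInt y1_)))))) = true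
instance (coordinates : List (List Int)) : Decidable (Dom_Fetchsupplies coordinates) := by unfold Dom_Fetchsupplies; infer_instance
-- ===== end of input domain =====

-- B replaces A's full sort + mirrored-gap loop by a quickselect of the median x-coordinate
-- followed by a sum of absolute deviations (objective: alternative algorithm).
-- NOTE: the Python A sorts its argument in place (an observable mutation); B does not —
-- the equivalence proved here is about the RETURN value only.

-- ===== PORT A =====
-- 'coordinates.sort(key=lambda x: x[0])': x[0] raises IndexError on an empty inner list;
-- such inputs are excluded by Pre_ (there the key is ported with default 0, outside any claim).
def Fetchsupplies (coordinates : List (List Int)) : Int :=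
  let cs := PySem.List.sorted coordinates (fun x => PySem.List.pyGetD x 0 0)
  let length : Int := cs.length
  let index : Int := if length % 2 == 0 then PySem.Int.floordiv length 2
                     else PySem.Int.floordiv (length + 1) 2
  let gap : Int := if length % 2 == 0 then 1 else 2
  ((PySem.List.pyRange index length).foldl
      (fun (st : Int × Int) i =>
        (st.1 + 2,
         st.2 + (PySem.List.pyGetD (PySem.List.pyGetD cs i []) 0 0
                 - PySem.List.pyGetD (PySem.List.pyGetD cs (i - st.1) []) 0 0)))
      (gap, 0)).2

-- ===== PORT B =====
-- termination helper for the quickselect partition loop (the pivot never passes the filter)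
theorem pvQselDec (c : Int) (rest : List Int) (f : Int → Bool)
    (hf : f ((c :: rest).getD ((c :: rest).length / 2) 0) = false) :
    ((c :: rest).filter f).length < (c :: rest).length := by
  have hlt : (c :: rest).length / 2 < (c :: rest).length :=
    Nat.div_lt_self (by simp) (by norm_num)
  apply List.length_filter_lt_length_iff_exists.2
  refine ⟨(c :: rest).getD ((c :: rest).length / 2) 0, ?_, by rw [hf]; simp⟩
  rw [List.getD_eq_getElem _ _ hlt]
  exact List.getElem_mem _

-- B's 'while True' partition loop, as recursion on the shrinking candidate list
def pvQsel : List Int → Nat → Int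
  | [], _ => 0      -- unreachable under B's use (cur is nonempty); totality guard only
  | c :: rest, k =>
    let cur := c :: rest
    let p := cur.getD (cur.length / 2) 0
    let lt := cur.filter (fun x => x < p)
    if k < lt.length then pvQsel lt k
    else
      let eq := cur.countP (fun x => x == p)
      if k < lt.length + eq then p
      else pvQsel (cur.filter (fun x => p < x)) (k - (lt.length + eq))
termination_by cur _ => cur.length
decreasing_by
  · exact pvQselDec c rest _ (by simp)
  · exact pvQselDec c rest _ (by simp)

def Fetchsupplies_alt (coordinates : List (List Int)) : Int :=
  let xs := coordinates.map (fun c => PySem.List.pyGetD c 0 0)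
  let n := xs.length
  if n = 0 then 0
  else
    let m := pvQsel xs (n / 2)
    (xs.map (fun x => |x - m|)).sum

-- ===== PRECONDITION & SPEC =====
-- Pre_ excludes exactly the inputs with an empty inner list, on which A's sort key x[0]
-- raises IndexError (B's comprehension c[0] raises there too).
def Pre_Fetchsupplies (coordinates : List (List Int)) : Prop :=
  ∀ c ∈ coordinates, c ≠ []
instance (coordinates : List (List Int)) : Decidable (Pre_Fetchsupplies coordinates) := by
  unfold Pre_Fetchsupplies; infer_instance

def pvWitness_Fetchsupplies : List (List Int) := [[3, 1], [1], [2, 5]]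

def Spec_Fetchsupplies (coordinates : List (List Int)) (out : Int) : Prop := out = Fetchsupplies_alt coordinates
instance (coordinates : List (List Int)) (out : Int) : Decidable (Spec_Fetchsupplies coordinates out) := by unfold Spec_Fetchsupplies; infer_instance

-- ===== CLAIM (what is proved, stated in full; the proofs are below) =====
def Claim_equal_Fetchsupplies : Prop := ∀ (coordinates : List (List Int)), Dom_Fetchsupplies coordinates → Pre_Fetchsupplies coordinates → Spec_Fetchsupplies coordinates (Fetchsupplies coordinates)

-- ===== LEMMAS AND PROOFS =====

-- generic split of a count along a second predicate
theorem pvCountSplit (l : List Int) (q pr : Int → Bool) :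
    l.countP q = l.countP (fun x => q x && pr x) + l.countP (fun x => q x && !pr x) := by
  induction l with
  | nil => simp
  | cons x t ih =>
    simp only [List.countP_cons, ih]
    cases hq : q x <;> cases hp : pr x <;> simp [hq, hp] <;> omega

-- quickselect returns an element whose rank brackets k (counts over the candidate list)
theorem pvQsel_spec : ∀ (N : Nat) (cur : List Int), cur.length ≤ N → ∀ k, k < cur.length →
    pvQsel cur k ∈ cur ∧
    cur.countP (fun x => x < pvQsel cur k) ≤ k ∧
    k < cur.countP (fun x => x ≤ pvQsel cur k) := by
  intro N
  induction N with
  | zero => intro cur hN k hk; omega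
  | succ N ih =>
    intro cur hN k hk
    match cur with
    | [] => simp at hk
    | c :: rest =>
      rw [pvQsel]
      simp only []
      set cur := c :: rest with hcur
      set p := cur.getD (cur.length / 2) 0 with hpdef
      have hp : p ∈ cur := by
        rw [hpdef, List.getD_eq_getElem _ _ (Nat.div_lt_self (by simp [hcur]) (by norm_num))]
        exact List.getElem_mem _
      set lt := cur.filter (fun x => x < p) with hltdef
      set eqc := cur.countP (fun x => x == p) with heqdef
      have hltcount : lt.length = cur.countP (fun x => decide (x < p)) := by
        rw [hltdef, List.countP_eq_length_filter]
      have hlecount : cur.countP (fun x => decide (x ≤ p)) = lt.length + eqc := by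
        rw [pvCountSplit cur (fun x => decide (x ≤ p)) (fun x => decide (x < p))]
        congr 1
        · rw [hltcount]
          apply List.countP_congr
          intro x _
          by_cases h : x < p <;> simp [h] <;> omega
        · rw [heqdef]
          apply List.countP_congr
          intro x _
          by_cases h : x = p <;> simp [h] <;> omega
      have hlensplit : cur.length = lt.length + eqc + (cur.filter (fun x => p < x)).length := by
        have h1 := pvCountSplit cur (fun _ => true) (fun x => decide (x ≤ p))
        have h2 : cur.countP (fun _ => true) = cur.length := by
          simp [List.countP_true]
        have h3 : cur.countP (fun x => true && decide (x ≤ p)) = lt.length + eqc := by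
          rw [← hlecount]; apply List.countP_congr; intro x _; simp
        have h4 : cur.countP (fun x => true && !decide (x ≤ p)) = (cur.filter (fun x => p < x)).length := by
          rw [List.countP_eq_length_filter]
          congr 1
          apply List.filter_congr
          intro x _
          by_cases h : p < x <;> simp [h] <;> omega
        omega
      split
      · -- k < lt.length : recurse on lt
        rename_i hklt
        have hltlen : lt.length < cur.length := by
          rw [hltdef, hcur]
          exact pvQselDec c rest _ (by rw [← hcur, ← hpdef]; simp)
        obtain ⟨hmem, hc1, hc2⟩ := ih lt (by omega) k (by omega)
        set r := pvQsel lt k with hr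
        have hrp : r < p := by
          have := List.mem_filter.1 (hltdef ▸ hmem)
          simpa using this.2
        refine ⟨List.mem_of_mem_filter (hltdef ▸ hmem), ?_, ?_⟩
        · have : cur.countP (fun x => decide (x < r)) = lt.countP (fun x => decide (x < r)) := by
            rw [hltdef, List.countP_filter]
            apply List.countP_congr
            intro x _
            by_cases h : x < r <;> simp [h] <;> omega
          omega
        · have : cur.countP (fun x => decide (x ≤ r)) = lt.countP (fun x => decide (x ≤ r)) := by
            rw [hltdef, List.countP_filter]
            apply List.countP_congr
            intro x _
            by_cases h : x ≤ r <;> simp [h] <;> omega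
          omega
      · rename_i hklt
        split
        · -- return the pivot
          rename_i hkle
          exact ⟨hp, by omega, by omega⟩
        · -- recurse on the strictly-greater part
          rename_i hkgt
          set gt := cur.filter (fun x => p < x) with hgtdef
          have hgtlen : gt.length < cur.length := by
            rw [hgtdef, hcur]
            exact pvQselDec c rest _ (by rw [← hcur, ← hpdef]; simp)
          have hk' : k - (lt.length + eqc) < gt.length := by omega
          obtain ⟨hmem, hc1, hc2⟩ := ih gt (by omega) _ hk'
          set r := pvQsel gt (k - (lt.length + eqc)) with hr
          have hpr : p < r := by
            have := List.mem_filter.1 (hgtdef ▸ hmem)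
            simpa using this.2
          refine ⟨List.mem_of_mem_filter (hgtdef ▸ hmem), ?_, ?_⟩
          · have hsplit := pvCountSplit cur (fun x => decide (x < r)) (fun x => decide (x ≤ p))
            have hA : cur.countP (fun x => decide (x < r) && decide (x ≤ p)) = lt.length + eqc := by
              rw [← hlecount]
              apply List.countP_congr
              intro x _
              by_cases h : x ≤ p <;> simp [h] <;> omega
            have hB : cur.countP (fun x => decide (x < r) && !decide (x ≤ p)) = gt.countP (fun x => decide (x < r)) := by
              rw [hgtdef, List.countP_filter]
              apply List.countP_congr
              intro x _
              by_cases h : p < x <;> by_cases h2 : x < r <;> simp [h, h2] <;> omega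
            omega
          · have hsplit := pvCountSplit cur (fun x => decide (x ≤ r)) (fun x => decide (x ≤ p))
            have hA : cur.countP (fun x => decide (x ≤ r) && decide (x ≤ p)) = lt.length + eqc := by
              rw [← hlecount]
              apply List.countP_congr
              intro x _
              by_cases h : x ≤ p <;> simp [h] <;> omega
            have hB : cur.countP (fun x => decide (x ≤ r) && !decide (x ≤ p)) = gt.countP (fun x => decide (x ≤ r)) := by
              rw [hgtdef, List.countP_filter]
              apply List.countP_congr
              intro x _
              by_cases h : p < x <;> by_cases h2 : x ≤ r <;> simp [h, h2] <;> omega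
            omega

-- in a sorted list, the element at index k is determined by its rank brackets
theorem pvSortedGet (zs : List Int) (hs : zs.Pairwise (· ≤ ·)) (k : Nat) (hk : k < zs.length)
    (r : Int) (h1 : zs.countP (fun x => x < r) ≤ k) (h2 : k < zs.countP (fun x => x ≤ r)) :
    zs[k] = r := by
  have hmono : ∀ i j (hi : i < zs.length) (hj : j < zs.length), i ≤ j → zs[i] ≤ zs[j] := by
    intro i j hi hj hij
    rcases Nat.lt_or_ge i j with h | h
    · exact List.pairwise_iff_getElem.1 hs i j hi hj h
    · have : i = j := by omega
      subst this; rfl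
  rcases lt_trichotomy zs[k] r with h | h | h
  · exfalso
    have hall : (zs.take (k + 1)).countP (fun x => x < r) = (zs.take (k + 1)).length := by
      rw [List.countP_eq_length]
      intro a ha
      rw [List.mem_iff_getElem] at ha
      obtain ⟨i, hi, rfl⟩ := ha
      have hi' : i < zs.length := by
        have := List.length_take_le (k + 1) zs; omega
      rw [List.getElem_take]
      have hik : i ≤ k := by
        have := List.length_take_le (k + 1) zs
        simp at hi
        omega
      simp only [decide_eq_true_eq]
      calc zs[i] ≤ zs[k] := hmono i k hi' hk hik
        _ < r := h
    have hsplit : zs.countP (fun x => x < r)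
        = (zs.take (k + 1)).countP (fun x => x < r) + (zs.drop (k + 1)).countP (fun x => x < r) := by
      conv_lhs => rw [← List.take_append_drop (k + 1) zs]
      rw [List.countP_append]
    have hlen : (zs.take (k + 1)).length = k + 1 := by
      simp [List.length_take]; omega
    omega
  · exact h
  · exfalso
    have hzero : (zs.drop k).countP (fun x => x ≤ r) = 0 := by
      rw [List.countP_eq_zero]
      intro a ha
      rw [List.mem_iff_getElem] at ha
      obtain ⟨i, hi, rfl⟩ := ha
      rw [List.getElem_drop]
      have hki : k + i < zs.length := by
        rw [List.length_drop] at hi; omega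
      have : zs[k] ≤ zs[k + i] := hmono k (k + i) hk hki (by omega)
      simp only [decide_eq_true_eq]
      omega
    have hsplit : zs.countP (fun x => x ≤ r)
        = (zs.take k).countP (fun x => x ≤ r) + (zs.drop k).countP (fun x => x ≤ r) := by
      conv_lhs => rw [← List.take_append_drop k zs]
      rw [List.countP_append]
    have hle : (zs.take k).countP (fun x => x ≤ r) ≤ (zs.take k).length := List.countP_le_length
    have hlen : (zs.take k).length ≤ k := List.length_take_le k zs
    omega

theorem pvSumAbsLe (l : List Int) (m : Int) (h : ∀ x ∈ l, x ≤ m) :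
    (l.map (fun x => |x - m|)).sum = l.length * m - l.sum := by
  induction l with
  | nil => simp
  | cons x t ih =>
    have hx := h x (by simp)
    have ht := ih (fun y hy => h y (by simp [hy]))
    simp only [List.map_cons, List.sum_cons, ht, List.length_cons]
    rw [abs_of_nonpos (by omega)]
    push_cast; ring

theorem pvSumAbsGe (l : List Int) (m : Int) (h : ∀ x ∈ l, m ≤ x) :
    (l.map (fun x => |x - m|)).sum = l.sum - l.length * m := by
  induction l with
  | nil => simp
  | cons x t ih =>
    have hx := h x (by simp)
    have ht := ih (fun y hy => h y (by simp [hy]))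
    simp only [List.map_cons, List.sum_cons, ht, List.length_cons]
    rw [abs_of_nonneg (by omega)]
    push_cast; ring

-- A's loop: for i in range(a, n): d += zs[i] - zs[i-gap]; gap += 2
-- equals (sum of zs[a:]) minus (sum of the cnt entries ending at index a-g)
theorem pvLoopA (zs : List Int) :
    ∀ (cnt : Nat) (a g d : Int),
      (zs.length : Int) - a = cnt → 1 ≤ g → 0 ≤ a - g - cnt + 1 →
      ((PySem.List.pyRange a zs.length).foldl
        (fun (st : Int × Int) i =>
          (st.1 + 2, st.2 + (PySem.List.pyGetD zs i 0 - PySem.List.pyGetD zs (i - st.1) 0)))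
        (g, d)).2
      = d + (zs.drop a.toNat).sum - ((zs.drop (a - g - cnt + 1).toNat).take cnt).sum := by
  intro cnt
  induction cnt with
  | zero =>
    intro a g d h1 hg h2
    have ha : a = (zs.length : Int) := by omega
    subst ha
    rw [PySem.List.pyRange_one_eq_nil (by omega)]
    simp
  | succ cnt ih =>
    intro a g d h1 hg h2
    have halen : a < (zs.length : Int) := by omega
    have ha0 : 0 ≤ a := by omega
    rw [PySem.List.pyRange_one_cons halen]
    simp only [List.foldl_cons]
    rw [ih (a + 1) (g + 2) _ (by omega) (by omega) (by push_cast; omega)]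
    have hanat : a.toNat < zs.length := by omega
    have hag0 : 0 ≤ a - g := by push_cast at h2; omega
    have haglen : a - g < (zs.length : Int) := by omega
    have hlo : (a + 1 - (g + 2) - cnt + 1) = a - g - (cnt + 1 : Nat) + 1 := by push_cast; omega
    rw [hlo]
    set lo : Int := a - g - (cnt + 1 : Nat) + 1 with hlodef
    have hlo0 : 0 ≤ lo := h2
    have hlocnt : lo.toNat + cnt = (a - g).toNat := by push_cast at hlodef ⊢; omega
    rw [PySem.List.pyGetD_eq_getElem zs 0 ha0 halen, PySem.List.pyGetD_eq_getElem zs 0 hag0 haglen]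
    have hdrop : zs.drop a.toNat = zs[a.toNat] :: zs.drop (a.toNat + 1) :=
      List.drop_eq_getElem_cons hanat
    have hA1 : (a + 1).toNat = a.toNat + 1 := by omega
    have hcntlt : cnt < (zs.drop lo.toNat).length := by
      rw [List.length_drop]; omega
    have htake : (zs.drop lo.toNat).take (cnt + 1)
        = (zs.drop lo.toNat).take cnt ++ [zs[(a - g).toNat]] := by
      rw [List.take_add_one]
      congr 1
      rw [List.getElem?_eq_getElem hcntlt]
      simp [List.getElem_drop, hlocnt]
    rw [hdrop, hA1, htake]
    simp only [List.sum_cons, List.sum_append, List.sum_nil]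
    ring

-- ===== VERDICT (by name: the statement is the Claim_ definition above) =====
theorem Fetchsupplies_spec : Claim_equal_Fetchsupplies := by
  intro coords0 _ _
  unfold Spec_Fetchsupplies
  match coords0 with
  | [] => decide
  | c0 :: crest =>
    set coords := c0 :: crest with hcoords
    set key : List Int → Int := fun c => PySem.List.pyGetD c 0 0 with hkey
    set n := coords.length with hn
    have hn0 : 0 < n := by rw [hn, hcoords]; simp
    set kl := n / 2 with hkl
    set cs := PySem.List.sorted coords key with hcs
    set zs := cs.map key with hzs
    set xs := coords.map key with hxs
    have hcslen : cs.length = n := by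
      rw [hcs, hn]; exact PySem.List.length_sorted coords key false
    have hzslen : zs.length = n := by rw [hzs, List.length_map, hcslen]
    have hxslen : xs.length = n := by rw [hxs, List.length_map, hn]
    have hperm : zs.Perm xs := (PySem.List.sorted_perm coords key false).map key
    have hsorted : zs.Pairwise (· ≤ ·) := PySem.List.sorted_map_key_pairwise coords key
    have hklzs : kl < zs.length := by rw [hzslen]; omega
    set m := pvQsel xs kl with hm
    obtain ⟨hmmem, hcnt1, hcnt2⟩ := pvQsel_spec xs.length xs le_rfl kl (by omega)
    have hzm : zs[kl] = m := by
      apply pvSortedGet zs hsorted kl hklzs m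
      · rw [hperm.countP_eq]; exact hcnt1
      · rw [hperm.countP_eq]; exact hcnt2
    have htakele : ∀ x ∈ zs.take kl, x ≤ m := by
      intro a ha
      rw [List.mem_iff_getElem] at ha
      obtain ⟨i, hi, rfl⟩ := ha
      have hi' : i < kl := by
        have := List.length_take_le kl zs; simp at hi; omega
      rw [List.getElem_take, ← hzm]
      exact List.pairwise_iff_getElem.1 hsorted i kl (by omega) hklzs hi'
    have hdropge : ∀ x ∈ zs.drop kl, m ≤ x := by
      intro a ha
      rw [List.mem_iff_getElem] at ha
      obtain ⟨i, hi, rfl⟩ := ha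
      rw [List.getElem_drop, ← hzm]
      have hki : kl + i < zs.length := by rw [List.length_drop] at hi; omega
      rcases Nat.eq_zero_or_pos i with h0 | h0
      · subst h0; simp
      · exact List.pairwise_iff_getElem.1 hsorted kl (kl + i) hklzs hki (by omega)
    -- closed form of B
    have hB : Fetchsupplies_alt coords
        = (kl : Int) * m - (zs.take kl).sum + ((zs.drop kl).sum - ((n - kl : Nat) : Int) * m) := by
      simp only [Fetchsupplies_alt]
      rw [← hkey, ← hxs, hxslen]
      rw [if_neg (by omega), ← hkl, ← hm]
      rw [← (hperm.map (fun x => |x - m|)).sum_eq]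
      conv_lhs => rw [← List.take_append_drop kl zs]
      rw [List.map_append, List.sum_append, pvSumAbsLe _ m htakele, pvSumAbsGe _ m hdropge]
      have h1 : (zs.take kl).length = kl := by simp [List.length_take]; omega
      have h2 : (zs.drop kl).length = n - kl := by simp [List.length_drop, hzslen]
      rw [h1, h2]
    -- closed form of A
    have hbody : (fun (st : Int × Int) i =>
          (st.1 + 2, st.2 + (PySem.List.pyGetD (PySem.List.pyGetD cs i []) 0 0
                 - PySem.List.pyGetD (PySem.List.pyGetD cs (i - st.1) []) 0 0)))
        = (fun (st : Int × Int) i =>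
          (st.1 + 2, st.2 + (PySem.List.pyGetD zs i 0 - PySem.List.pyGetD zs (i - st.1) 0))) := by
      funext st i
      have hkey0 : key [] = (0 : Int) := by rw [hkey]; simp [PySem.List.pyGetD_zero]
      have h1 : ∀ j : Int, PySem.List.pyGetD zs j 0 = key (PySem.List.pyGetD cs j []) := by
        intro j
        rw [hzs, ← hkey0, PySem.List.pyGetD_map]
      simp only [h1, hkey]
    have hA : Fetchsupplies coords = (zs.drop (n - kl)).sum - (zs.take kl).sum := by
      simp only [Fetchsupplies]
      rw [← hkey, ← hcs, hcslen, hbody]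
      by_cases hpar : n % 2 = 0
      · have hif : (((n : Int)) % 2 == 0) = true := by simp only [beq_iff_eq]; omega
        rw [if_pos hif, if_pos hif]
        have hidx : PySem.Int.floordiv (n : Int) 2 = (kl : Int) := by
          rw [PySem.Int.floordiv_eq_ediv_of_pos (by norm_num)]; omega
        rw [hidx, show ((n : Int)) = (zs.length : Int) by rw [hzslen]]
        rw [pvLoopA zs (n - kl) (kl : Int) 1 0 (by push_cast; omega) (by norm_num)
          (by push_cast; omega)]
        have hlo : ((kl : Int) - 1 - ((n - kl : Nat) : Int) + 1) = 0 := by push_cast; omega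
        rw [hlo]
        simp only [Int.toNat_zero, Int.toNat_natCast, List.drop_zero]
        rw [show n - kl = kl from by omega]
        ring
      · have hif : ¬ (((n : Int)) % 2 == 0) = true := by simp only [beq_iff_eq]; omega
        rw [if_neg hif, if_neg hif]
        have hidx : PySem.Int.floordiv ((n : Int) + 1) 2 = ((n - kl : Nat) : Int) := by
          rw [PySem.Int.floordiv_eq_ediv_of_pos (by norm_num)]; push_cast; omega
        rw [hidx, show ((n : Int)) = (zs.length : Int) by rw [hzslen]]
        rw [pvLoopA zs kl ((n - kl : Nat) : Int) 2 0 (by push_cast; omega) (by norm_num)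
          (by push_cast; omega)]
        have hlo : (((n - kl : Nat) : Int) - 2 - (kl : Int) + 1) = 0 := by push_cast; omega
        rw [hlo]
        simp only [Int.toNat_zero, Int.toNat_natCast, List.drop_zero]
        ring
    rw [hA, hB]
    by_cases hpar : n % 2 = 0
    · rw [show n - kl = kl from by omega]
      ring
    · have hdc : zs.drop kl = zs[kl] :: zs.drop (kl + 1) := List.drop_eq_getElem_cons hklzs
      rw [hdc, hzm, List.sum_cons, show n - kl = kl + 1 from by omega]
      push_cast
      ring
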